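-- pv_equiv track=rewrite | github.com/abhishekHegde2000/DSA-Bootcamp | discuss/meta/calculate_island_size.py | largest_new_island
-- ===== SOURCE A (Python) =====
-- def largest_new_island(grid):
--     from collections import deque
--
--     rows, cols = len(grid), len(grid[0])
--
--     def is_valid_cell(r, c):
--         """Check if a cell is within bounds and is water."""
--         return 0 <= r < rows and 0 <= c < cols and grid[r][c] == 0
--
--     def is_adjacent_to_land(r, c):
--         """Check if the cell is adjacent to any land (1)."""
--         directions = [(-1, 0), (1, 0), (0, -1), (0, 1),
--                       (-1, -1), (-1, 1), (1, -1), (1, 1)]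
--         for dr, dc in directions:
--             nr, nc = r + dr, c + dc
--             if 0 <= nr < rows and 0 <= nc < cols and grid[nr][nc] == 1:
--                 return True
--         return False
--
--     def calculate_island_size(r, c):
--         """Perform BFS to calculate the size of the island starting from (r, c)."""
--         visited = set()
--         queue = deque([(r, c)])
--         size = 0
--
--         while queue:
--             cr, cc = queue.popleft()
--             if (cr, cc) in visited:
--                 continue
--
--             visited.add((cr, cc))
--             size += 1
--
--             # Explore neighbors
--             for dr, dc in [(-1, 0), (1, 0), (0, -1), (0, 1)]:
--                 nr, nc = cr + dr, cc + dc
--                 if 0 <= nr < rows and 0 <= nc < cols and grid[nr][nc] == 1 and (nr, nc) not in visited: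
--                     queue.append((nr, nc))
--
--         return size
--
--     max_new_island_size = 0
--
--     for r in range(rows):
--         for c in range(cols):
--             if grid[r][c] == 0 and not is_adjacent_to_land(r, c):
--                 # Temporarily turn this cell into land
--                 grid[r][c] = 1
--
--                 # Calculate island size
--                 new_island_size = calculate_island_size(r, c)
--                 max_new_island_size = max(
--                     max_new_island_size, new_island_size)
--
--                 # Revert the change
--                 grid[r][c] = 0
--
--     return max_new_island_size
-- ===== SOURCE B (Python) =====
-- def largest_new_island(grid):
--     rows, cols = len(grid), len(grid[0])
--     has_candidate = any(
--         grid[r][c] == 0 and not any(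
--             0 <= r + dr < rows and 0 <= c + dc < cols and grid[r + dr][c + dc] == 1
--             for dr, dc in ((-1, -1), (-1, 0), (-1, 1), (0, -1),
--                            (0, 1), (1, -1), (1, 0), (1, 1)))
--         for r in range(rows) for c in range(cols))
--     return 1 if has_candidate else 0
-- ===== Notes on version B (the rewrite author's own statement) =====
-- stated objective: simpler
-- what changed: B replaces the per-candidate BFS, visited set and temporary in-place mutation by a single scan: a zero cell with no land among its eight neighbours always yields a one-cell island, so B just tests for the existence of such a cell and returns 1 or 0.
import Mathlib
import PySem

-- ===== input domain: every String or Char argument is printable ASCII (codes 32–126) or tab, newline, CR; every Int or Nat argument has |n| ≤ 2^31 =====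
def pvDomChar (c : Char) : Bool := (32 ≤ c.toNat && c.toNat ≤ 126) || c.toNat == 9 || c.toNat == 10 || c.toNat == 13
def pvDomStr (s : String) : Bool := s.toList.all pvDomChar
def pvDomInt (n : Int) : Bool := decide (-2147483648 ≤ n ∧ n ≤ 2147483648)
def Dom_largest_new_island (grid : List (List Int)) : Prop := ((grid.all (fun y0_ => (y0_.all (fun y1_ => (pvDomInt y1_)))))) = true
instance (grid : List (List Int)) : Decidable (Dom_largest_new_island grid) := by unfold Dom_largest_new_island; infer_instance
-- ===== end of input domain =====

-- B drops A's per-candidate BFS, visited set and temporary in-place mutation (A reverts it, so A has no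
-- net side effect) and just tests whether some zero cell has no land among its eight neighbours.

-- ===== PORT A =====
-- grid[r][c] for guaranteed-nonnegative indices (exact in bounds; out of bounds excluded by Pre_)
def pvCell (g : List (List Int)) (r c : Int) : Int :=
  PySem.List.pyGetD (PySem.List.pyGetD g r []) c 0

def pvDirs8 : List (Int × Int) := [(-1,0),(1,0),(0,-1),(0,1),(-1,-1),(-1,1),(1,-1),(1,1)]
def pvDirs4 : List (Int × Int) := [(-1,0),(1,0),(0,-1),(0,1)]

-- is_adjacent_to_land: first-True loop over the 8 directions = .any
def pvIsAdj (g : List (List Int)) (rows cols r c : Int) : Bool :=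
  pvDirs8.any (fun d =>
    decide (0 ≤ r + d.1) && decide (r + d.1 < rows) &&
    decide (0 ≤ c + d.2) && decide (c + d.2 < cols) &&
    (pvCell g (r + d.1) (c + d.2) == 1))

-- calculate_island_size's BFS loop; fuel bounds the number of pops (each unvisited pop adds ≤ 4
-- queue entries and there are ≤ rows*cols unvisited pops, so the fuel passed below never runs out)
def pvBFS (g : List (List Int)) (rows cols : Int) :
    Nat → List (Int × Int) → PySem.Set (Int × Int) → Int → Int
  | 0, _, _, size => size
  | _ + 1, [], _, size => size
  | fuel + 1, cur :: q, visited, size =>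
    if cur ∈ visited then pvBFS g rows cols fuel q visited size
    else
      let visited' := PySem.Set.add visited cur
      let q' := q ++ pvDirs4.filterMap (fun d =>
        if 0 ≤ cur.1 + d.1 ∧ cur.1 + d.1 < rows ∧ 0 ≤ cur.2 + d.2 ∧ cur.2 + d.2 < cols ∧
           pvCell g (cur.1 + d.1) (cur.2 + d.2) = 1 ∧ (cur.1 + d.1, cur.2 + d.2) ∉ visited'
        then some (cur.1 + d.1, cur.2 + d.2) else none)
      pvBFS g rows cols fuel q' visited' (size + 1)

def largest_new_island (grid : List (List Int)) : Int :=
  let rows : Int := grid.length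
  let cols : Int := (PySem.List.pyGetD grid 0 []).length
  (PySem.List.pyRange 0 rows 1).foldl (fun acc r =>
    (PySem.List.pyRange 0 cols 1).foldl (fun acc c =>
      if pvCell grid r c = 0 ∧ ¬ pvIsAdj grid rows cols r c = true then
        -- grid[r][c] = 1 (temporary mutation), BFS, then grid[r][c] = 0 (reverted: read-only afterwards)
        let g' := grid.set r.toNat ((PySem.List.pyGetD grid r []).set c.toNat 1)
        max acc (pvBFS g' rows cols (1 + 4 * grid.length * (PySem.List.pyGetD grid 0 []).length)
                 [(r, c)] PySem.Set.empty 0)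
      else acc) acc) 0

-- ===== PORT B =====
def altDirs : List (Int × Int) := [(-1,-1),(-1,0),(-1,1),(0,-1),(0,1),(1,-1),(1,0),(1,1)]

def largest_new_island_alt (grid : List (List Int)) : Int :=
  let rows : Int := grid.length
  let cols : Int := (PySem.List.pyGetD grid 0 []).length
  if (PySem.List.pyRange 0 rows 1).any (fun r =>
       (PySem.List.pyRange 0 cols 1).any (fun c =>
         (pvCell grid r c == 0) &&
         !(altDirs.any (fun d =>
             decide (0 ≤ r + d.1) && decide (r + d.1 < rows) &&
             decide (0 ≤ c + d.2) && decide (c + d.2 < cols) &&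
             (pvCell grid (r + d.1) (c + d.2) == 1)))))
  then 1 else 0

-- ===== PRECONDITION & SPEC =====
-- Pre_ excludes exactly the inputs where A raises IndexError: the empty grid (len(grid[0]))
-- and ragged grids with a row shorter than row 0 (grid[r][c] for c < cols).
def Pre_largest_new_island (grid : List (List Int)) : Prop :=
  grid ≠ [] ∧ ∀ row ∈ grid, (PySem.List.pyGetD grid 0 []).length ≤ row.length
instance (grid : List (List Int)) : Decidable (Pre_largest_new_island grid) := by
  unfold Pre_largest_new_island; infer_instance

def pvWitness_largest_new_island : List (List Int) := [[0, 1], [0, 0]]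

def Spec_largest_new_island (grid : List (List Int)) (out : Int) : Prop := out = largest_new_island_alt grid
instance (grid : List (List Int)) (out : Int) : Decidable (Spec_largest_new_island grid out) := by
  unfold Spec_largest_new_island; infer_instance

-- ===== CLAIM (what is proved, stated in full; the proofs are below) =====
def Claim_equal_largest_new_island : Prop := ∀ (grid : List (List Int)), Dom_largest_new_island grid → Pre_largest_new_island grid → Spec_largest_new_island grid (largest_new_island grid)

-- ===== LEMMAS AND PROOFS =====

theorem pvBFS_nil (g : List (List Int)) (rows cols : Int) (n : Nat)
    (v : PySem.Set (Int × Int)) (s : Int) : pvBFS g rows cols n [] v s = s := by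
  cases n <;> rfl

theorem pvCell_set_ne (grid : List (List Int)) (r c r' c' : Int)
    (hr : 0 ≤ r) (hc : 0 ≤ c) (hr' : 0 ≤ r') (hc' : 0 ≤ c') (hne : ¬ (r' = r ∧ c' = c)) :
    pvCell (grid.set r.toNat ((PySem.List.pyGetD grid r []).set c.toNat 1)) r' c' = pvCell grid r' c' := by
  have hgr : PySem.List.pyGetD grid r [] = grid.getD r.toNat [] := PySem.List.pyGetD_of_nonneg _ _ hr
  unfold pvCell
  rw [PySem.List.pyGetD_of_nonneg _ _ hr', PySem.List.pyGetD_of_nonneg _ _ hr']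
  by_cases hrr : r'.toNat = r.toNat
  · have hre : r' = r := by omega
    have hcc : c'.toNat ≠ c.toNat := by
      have : c' ≠ c := fun h => hne ⟨hre, h⟩
      omega
    by_cases hlen : r.toNat < grid.length
    · rw [hrr, List.getD_eq_getElem?_getD, List.getD_eq_getElem?_getD,
          List.getElem?_set_self hlen]
      simp only [Option.getD_some]
      rw [hgr, List.getD_eq_getElem?_getD]
      rw [PySem.List.pyGetD_of_nonneg _ _ hc', PySem.List.pyGetD_of_nonneg _ _ hc',
          List.getD_eq_getElem?_getD, List.getD_eq_getElem?_getD,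
          List.getElem?_set_ne (fun h => hcc h.symm)]
    · rw [List.set_eq_of_length_le (by omega)]
  · rw [List.getD_eq_getElem?_getD, List.getD_eq_getElem?_getD,
        List.getElem?_set_ne (fun h => hrr h.symm)]

theorem pvBFS_candidate (grid : List (List Int)) (rows cols r c : Int) (n : Nat)
    (hr : 0 ≤ r) (hc : 0 ≤ c) (hadj : ¬ pvIsAdj grid rows cols r c = true) :
    pvBFS (grid.set r.toNat ((PySem.List.pyGetD grid r []).set c.toNat 1)) rows cols (n + 1)
      [(r, c)] PySem.Set.empty 0 = 1 := by
  have hfm : pvDirs4.filterMap (fun d =>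
      if 0 ≤ r + d.1 ∧ r + d.1 < rows ∧ 0 ≤ c + d.2 ∧ c + d.2 < cols ∧
         pvCell (grid.set r.toNat ((PySem.List.pyGetD grid r []).set c.toNat 1)) (r + d.1) (c + d.2) = 1 ∧
         (r + d.1, c + d.2) ∉ PySem.Set.add ([] : PySem.Set (Int × Int)) (r, c)
      then some (r + d.1, c + d.2) else none) = [] := by
    rw [List.filterMap_eq_nil_iff]
    intro d hd
    have hd0 : d.1 ≠ 0 ∨ d.2 ≠ 0 := by fin_cases hd <;> simp
    have hd8 : d ∈ pvDirs8 := by fin_cases hd <;> decide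
    split_ifs with hcnd
    · obtain ⟨h1, h2, h3, h4, h5, h6⟩ := hcnd
      rw [pvCell_set_ne grid r c _ _ hr hc h1 h3
        (by rintro ⟨ha, hb⟩; rcases hd0 with h | h <;> omega)] at h5
      refine absurd ?_ hadj
      unfold pvIsAdj
      rw [List.any_eq_true]
      exact ⟨d, hd8, by simp [h1, h2, h3, h4, h5]⟩
    · rfl
  simp only [pvBFS, PySem.Set.empty, List.not_mem_nil, if_false, List.nil_append]
  rw [hfm]
  exact pvBFS_nil _ _ _ _ _ _

theorem foldl_max_one {α : Type} (p : α → Prop) [DecidablePred p] (f : α → Int) :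
    ∀ (l : List α) (acc : Int), (∀ x ∈ l, p x → f x = 1) →
    l.foldl (fun acc x => if p x then max acc (f x) else acc) acc =
      if l.any (fun x => decide (p x)) then max acc 1 else acc
  | [], acc, _ => by simp
  | x :: l, acc, h => by
    by_cases hx : p x
    · rw [List.foldl_cons, if_pos hx, h x (by simp) hx,
          foldl_max_one p f l (max acc 1) (fun y hy hp => h y (by simp [hy]) hp)]
      simp [hx]
    · rw [List.foldl_cons, if_neg hx,
          foldl_max_one p f l acc (fun y hy hp => h y (by simp [hy]) hp)]
      simp [hx]

-- ===== VERDICT (by name: the statement is the Claim_ definition above) =====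
theorem largest_new_island_spec : Claim_equal_largest_new_island := by
  intro grid _ _
  unfold Spec_largest_new_island
  simp only [largest_new_island, largest_new_island_alt]
  set rows : Int := (grid.length : Int) with hrows
  set cols : Int := ((PySem.List.pyGetD grid 0 []).length : Int) with hcols
  have houter : ∀ (acc : Int), ∀ r ∈ PySem.List.pyRange 0 rows 1,
      (PySem.List.pyRange 0 cols 1).foldl (fun acc c =>
        if pvCell grid r c = 0 ∧ ¬ pvIsAdj grid rows cols r c = true then
          max acc (pvBFS (grid.set r.toNat ((PySem.List.pyGetD grid r []).set c.toNat 1)) rows cols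
            (1 + 4 * grid.length * (PySem.List.pyGetD grid 0 []).length) [(r, c)] PySem.Set.empty 0)
        else acc) acc
      = if (PySem.List.pyRange 0 cols 1).any (fun c =>
            decide (pvCell grid r c = 0 ∧ ¬ pvIsAdj grid rows cols r c = true)) then max acc 1
        else acc := by
    intro acc r hrmem
    have hr0 : 0 ≤ r := (PySem.List.mem_pyRange_one.1 hrmem).1
    refine foldl_max_one _ _ _ _ ?_
    intro cc hcc hp
    have hc0 : 0 ≤ cc := (PySem.List.mem_pyRange_one.1 hcc).1
    have hm : 1 + 4 * grid.length * (PySem.List.pyGetD grid 0 []).length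
        = 4 * grid.length * (PySem.List.pyGetD grid 0 []).length + 1 := Nat.add_comm _ _
    rw [hm]
    exact pvBFS_candidate grid rows cols r cc _ hr0 hc0 hp.2
  rw [PySem.List.foldl_congr_mem _ _ (fun acc r =>
      if (PySem.List.pyRange 0 cols 1).any (fun c =>
        decide (pvCell grid r c = 0 ∧ ¬ pvIsAdj grid rows cols r c = true)) = true then max acc 1
      else acc) 0 houter]
  rw [foldl_max_one (fun r => ((PySem.List.pyRange 0 cols 1).any (fun c =>
        decide (pvCell grid r c = 0 ∧ ¬ pvIsAdj grid rows cols r c = true))) = true)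
      (fun _ => 1) _ 0 (fun _ _ _ => rfl)]
  have hbc : ∀ (r c : Int), decide (pvCell grid r c = 0 ∧ ¬ pvIsAdj grid rows cols r c = true)
      = ((pvCell grid r c == 0) && !(altDirs.any (fun d =>
          decide (0 ≤ r + d.1) && decide (r + d.1 < rows) &&
          decide (0 ≤ c + d.2) && decide (c + d.2 < cols) &&
          (pvCell grid (r + d.1) (c + d.2) == 1)))) := by
    intro r c
    have hperm : (altDirs.any (fun d =>
        decide (0 ≤ r + d.1) && decide (r + d.1 < rows) &&
        decide (0 ≤ c + d.2) && decide (c + d.2 < cols) &&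
        (pvCell grid (r + d.1) (c + d.2) == 1))) = pvIsAdj grid rows cols r c := by
      unfold pvIsAdj
      exact List.Perm.any_eq (by decide)
    rw [hperm]
    cases hpv : pvIsAdj grid rows cols r c <;> by_cases hz : pvCell grid r c = 0 <;>
      simp [hz]
  have hdec : ∀ b : Bool, decide (b = true) = b := fun b => by cases b <;> rfl
  simp only [hbc, hdec]
  norm_num
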